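-- pv_equiv track=rewrite | github.com/syedfquadri/AdventOfCoding2022 | day6.py | sub_Routine
-- ===== SOURCE A (Python) =====
-- def sub_Routine(f):
--     a = 0
--     b = []
--     for idx, j in enumerate(f):
--         if len(b)==14 and idx!=0:
--             if len(set(b))==len(b):
--                 return idx
--             else:
--                 del b[0]
--                 b.append(j)
--         else:
--             b.append(j)
--     return idx
-- ===== SOURCE B (Python) =====
-- def sub_Routine(f):
--     # One-pass two-pointer scan: `last` maps each character to its most recent
--     # index, `left` is the start of the current duplicate-free window.
--     last = {}
--     left = 0
--     for r, c in enumerate(f):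
--         if c in last and last[c] >= left:
--             left = last[c] + 1
--         last[c] = r
--         if r - left >= 13:
--             return r + 1
--     return r  # no marker: index of the last character scanned
-- ===== Notes on version B (the rewrite author's own statement) =====
-- stated objective: faster
-- what changed: Replaces A's sliding 14-char buffer that is rebuilt and dedup-checked with set() at every position by a one-pass two-pointer scan that keeps each character's last index in a dict and maintains the start of the longest duplicate-free window; Pre_ excludes only the empty string, on which both programs raise UnboundLocalError.
-- intended difference: On strings whose only duplicate-free 14-character window is the final one, A returns len(f)-1 because it tests each window one position late and never examines the window ending at the last character, while B returns len(f), the intended position of the first marker. — e.g. on sub_Routine("abcdefghijklmn"): A returns 13, B returns 14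
import Mathlib
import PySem

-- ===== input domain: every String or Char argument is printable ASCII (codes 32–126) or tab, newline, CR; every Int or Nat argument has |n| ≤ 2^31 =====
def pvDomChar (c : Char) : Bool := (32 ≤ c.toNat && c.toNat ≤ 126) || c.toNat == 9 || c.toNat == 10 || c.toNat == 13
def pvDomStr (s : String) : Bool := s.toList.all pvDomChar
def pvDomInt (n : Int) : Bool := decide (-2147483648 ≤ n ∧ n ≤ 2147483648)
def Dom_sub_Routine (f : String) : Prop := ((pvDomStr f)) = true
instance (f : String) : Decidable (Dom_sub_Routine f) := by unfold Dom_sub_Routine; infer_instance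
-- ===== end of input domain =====

-- B replaces A's sliding 14-char buffer rebuilt with set() at every step by a one-pass
-- two-pointer scan keeping each char's last index in a dict; on the stated D_ corner
-- (first marker window ends at the last character) B returns the marker A misses.

-- ===== PORT A =====
-- literal port of A: buffer b, counter idx; 'return idx' after the loop is the last
-- enumerate index, i.e. the counter minus one (on "" Python raises UnboundLocalError,
-- excluded by Pre_).
def pvAGo (idx : Int) (l : List Char) (b : List Char) : Int :=
  match l with
  | [] => idx - 1
  | j :: rest =>
    if b.length = 14 ∧ idx ≠ 0 then
      if (PySem.Set.ofList b).length = b.length then idx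
      else pvAGo (idx + 1) rest (b.drop 1 ++ [j])
    else pvAGo (idx + 1) rest (b ++ [j])

def sub_Routine (f : String) : Int := pvAGo 0 f.toList []

-- ===== PORT B =====
-- literal port of Source B: last : char -> last index, left pointer, r counter;
-- 'return r' after the loop is the last enumerate index, i.e. the counter minus one
-- (on "" Python raises UnboundLocalError, excluded by Pre_).
def pvBGo (d : PySem.Dict Char Int) (left : Int) (r : Int) (l : List Char) : Int :=
  match l with
  | [] => r - 1
  | c :: rest =>
    let left' := match d.get? c with
      | some p => if left ≤ p then p + 1 else left
      | none => left
    let d' := d.insert c r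
    if r - left' ≥ 13 then r + 1
    else pvBGo d' left' (r + 1) rest

def sub_Routine_alt (f : String) : Int :=
  pvBGo PySem.Dict.empty 0 0 f.toList

-- ===== PRECONDITION & SPEC =====
-- Pre_ excludes only the empty string, on which both A and B raise UnboundLocalError.
def Pre_sub_Routine (f : String) : Prop := f ≠ ""
instance (f : String) : Decidable (Pre_sub_Routine f) := by unfold Pre_sub_Routine; infer_instance
def pvWitness_sub_Routine : String := "abcdefghijklmnop"

-- On strings whose only duplicate-free 14-character window is the final one, A returns
-- len(f)-1 (it tests each window one position late and never examines the window ending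
-- at the last character), while B returns len(f), the intended position of the first marker.
def D_sub_Routine (f : String) : Prop :=
  ((f.toList.drop (f.toList.length - 14)).take 14).Nodup ∧ 14 ≤ f.toList.length ∧
  ∀ e < f.toList.length, 14 ≤ e → ¬ ((f.toList.take e).drop (e - 14)).Nodup
instance (f : String) : Decidable (D_sub_Routine f) := by unfold D_sub_Routine; infer_instance

def Spec_sub_Routine (f : String) (out : Int) : Prop := ¬ D_sub_Routine f → out = sub_Routine_alt f
instance (f : String) (out : Int) : Decidable (Spec_sub_Routine f out) := by unfold Spec_sub_Routine; infer_instance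

def pvDiffWitness_sub_Routine : String := "abcdefghijklmn"
def pvDiffWitnessOut_sub_Routine : Int × Int := (13, 14)

-- ===== CLAIM (what is proved, stated in full; the proofs are below) =====
def Claim_unchanged_sub_Routine : Prop := ∀ (f : String), Dom_sub_Routine f → Pre_sub_Routine f → Spec_sub_Routine f (sub_Routine f)
def Claim_changed_sub_Routine : Prop := Dom_sub_Routine (pvDiffWitness_sub_Routine) ∧ Pre_sub_Routine (pvDiffWitness_sub_Routine) ∧ D_sub_Routine (pvDiffWitness_sub_Routine) ∧ sub_Routine (pvDiffWitness_sub_Routine) = pvDiffWitnessOut_sub_Routine.1 ∧ sub_Routine_alt (pvDiffWitness_sub_Routine) = pvDiffWitnessOut_sub_Routine.2 ∧ pvDiffWitnessOut_sub_Routine.1 ≠ pvDiffWitnessOut_sub_Routine.2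
def Claim_exact_sub_Routine : Prop := ∀ (f : String), Dom_sub_Routine f → Pre_sub_Routine f → D_sub_Routine f → sub_Routine f ≠ sub_Routine_alt f

-- ===== LEMMAS AND PROOFS =====

-- A's port equals this first-match search: the first index i with 14 ≤ i < n whose
-- preceding window l[i-14:i] is duplicate-free, else n-1
def pvFind (l : List Char) (i : Nat) : Int :=
  if _h : i < l.length then
    if 14 ≤ i ∧ ((l.drop (i - 14)).take 14).Nodup then (i : Int) else pvFind l (i + 1)
  else (l.length : Int) - 1
termination_by l.length - i

-- B's port equals the same search with ends 14 ≤ i ≤ n (the final window included)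
def pvFindB (l : List Char) (i : Nat) : Int :=
  if _h : i ≤ l.length then
    if 14 ≤ i ∧ ((l.drop (i - 14)).take 14).Nodup then (i : Int) else pvFindB l (i + 1)
  else (l.length : Int) - 1
termination_by l.length + 1 - i

theorem pvFind_ge (l : List Char) (i : Nat) (h : l.length ≤ i) :
    pvFind l i = (l.length : Int) - 1 := by
  rw [pvFind, dif_neg (by omega)]

theorem pvFindB_gt (l : List Char) (i : Nat) (h : l.length < i) :
    pvFindB l i = (l.length : Int) - 1 := by
  rw [pvFindB, dif_neg (by omega)]

-- ---- set-length = nodup ----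
theorem pv_drop_sublist_drop (l : List Char) (a b : Nat) (h : a ≤ b) :
    (l.drop b).Sublist (l.drop a) := by
  have heq : l.drop b = (l.drop a).drop (b - a) := by rw [List.drop_drop]; congr 1; omega
  rw [heq]; exact List.drop_sublist _ _

theorem pv_ofList_sublist {α : Type} [BEq α] (xs : List α) : (PySem.Set.ofList xs).Sublist xs := by
  induction xs using List.reverseRecOn with
  | nil => simp [PySem.Set.ofList]
  | append_singleton p x ih =>
    rw [PySem.Set.ofList_eq_foldl, List.foldl_append] at *
    simp only [List.foldl_cons, List.foldl_nil]
    rw [← PySem.Set.ofList_eq_foldl] at *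
    show (PySem.Set.add (PySem.Set.ofList p) x).Sublist (p ++ [x])
    unfold PySem.Set.add
    split
    · exact ih.trans (List.sublist_append_left p [x])
    · exact List.Sublist.append ih (List.Sublist.refl [x])

theorem pv_set_len_iff (b : List Char) : ((PySem.Set.ofList b).length = b.length) ↔ b.Nodup := by
  constructor
  · intro h
    have heq : PySem.Set.ofList b = b := (pv_ofList_sublist b).eq_of_length h
    rw [← heq]; exact PySem.Set.nodup_ofList b
  · intro h; rw [PySem.Set.ofList_eq_self_of_nodup _ h]

-- ---- window algebra ----
theorem pv_window_len (l : List Char) (i : Nat) (h14 : 14 ≤ i) (hn : i ≤ l.length) :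
    ((l.drop (i - 14)).take 14).length = 14 := by
  simp [List.length_take, List.length_drop]; omega

theorem pv_window_shift (l : List Char) (i : Nat) (h14 : 14 ≤ i) (hn : i < l.length) :
    ((l.drop (i - 14)).take 14).drop 1 ++ [l[i]] = (l.drop (i - 13)).take 14 := by
  have h0 : i - 14 + 1 = i - 13 := by omega
  have h1 : l.drop (i - 14) = l[i - 14] :: l.drop (i - 13) := by
    rw [List.drop_eq_getElem_cons (show i - 14 < l.length by omega), h0]
  have hidx : i - 13 + 13 = i := by omega
  have h2 : (l.drop (i - 13)).take 14 = (l.drop (i - 13)).take 13 ++ [l[i]] := by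
    have h3 : (13 : Nat) + 1 = 14 := rfl
    rw [← h3, List.take_add_one, List.getElem?_drop, hidx, List.getElem?_eq_getElem hn]
    simp
  rw [h1, h2]
  simp

-- ---- A-side loop characterisation ----
theorem pv_phase2 (l : List Char) : ∀ k i, l.length - i = k → 14 ≤ i → i ≤ l.length →
    pvAGo (i : Int) (l.drop i) ((l.drop (i - 14)).take 14) = pvFind l i := by
  intro k
  induction k with
  | zero =>
    intro i hk h14 hi
    have hie : i = l.length := by omega
    rw [hie, List.drop_length, pvFind_ge l l.length (le_refl _)]
    rfl
  | succ k ih =>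
    intro i hk h14 hi
    have hlt : i < l.length := by omega
    rw [List.drop_eq_getElem_cons hlt]
    rw [pvAGo]
    rw [if_pos ⟨pv_window_len l i h14 hi, by omega⟩]
    rw [pvFind, dif_pos hlt]
    by_cases hnd : ((l.drop (i - 14)).take 14).Nodup
    · rw [if_pos ((pv_set_len_iff _).mpr hnd), if_pos ⟨h14, hnd⟩]
    · rw [if_neg (fun hc => hnd ((pv_set_len_iff _).mp hc)), if_neg (by simp [hnd])]
      have hshift := pv_window_shift l i h14 hlt
      have hidx : i - 13 = i + 1 - 14 := by omega
      have hstep : ((l.drop (i - 14)).take 14).drop 1 ++ [l[i]] = (l.drop (i + 1 - 14)).take 14 := by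
        rw [hshift, hidx]
      rw [hstep]
      have hc : (i : Int) + 1 = ((i + 1 : Nat) : Int) := by push_cast; ring
      rw [hc]
      exact ih (i + 1) (by omega) (by omega) (by omega)

theorem pv_phase1 (l : List Char) : ∀ k i, 14 - i = k → i ≤ 14 → i ≤ l.length →
    pvAGo (i : Int) (l.drop i) (l.take i) = pvFind l 14 := by
  intro k
  induction k with
  | zero =>
    intro i hk hi hn
    have hie : i = 14 := by omega
    subst hie
    have h := pv_phase2 l (l.length - 14) 14 rfl (le_refl _) hn
    simpa using h
  | succ k ih =>
    intro i hk hi hn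
    have hi14 : i < 14 := by omega
    by_cases hlt : i < l.length
    · rw [List.drop_eq_getElem_cons hlt, pvAGo]
      rw [if_neg (by simp [List.length_take]; omega)]
      have htake : l.take i ++ [l[i]] = l.take (i + 1) := by
        rw [List.take_add_one, List.getElem?_eq_getElem hlt]
        simp
      rw [htake]
      have hc : (i : Int) + 1 = ((i + 1 : Nat) : Int) := by push_cast; ring
      rw [hc]
      exact ih (i + 1) (by omega) (by omega) (by omega)
    · have hie : i = l.length := by omega
      rw [hie, List.drop_length, pvFind_ge l 14 (by omega)]
      rfl

theorem pv_A_eq (f : String) : sub_Routine f = pvFind f.toList 14 := by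
  have := pv_phase1 f.toList 14 0 rfl (by omega) (by omega)
  simpa [sub_Routine] using this

-- ---- last-occurrence index ----
def pvLast? : List Char → Char → Option Nat
  | [], _ => none
  | a :: t, c =>
    match pvLast? t c with
    | some m => some (m + 1)
    | none => if a = c then some 0 else none

theorem pvLast?_append (p : List Char) (c' c : Char) :
    pvLast? (p ++ [c']) c = if c = c' then some p.length else pvLast? p c := by
  induction p with
  | nil =>
    by_cases h : c = c'
    · simp [pvLast?, h]
    · simp [pvLast?, h, Ne.symm h]
  | cons a t ih =>
    simp only [List.cons_append, pvLast?, ih]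
    by_cases h : c = c'
    · simp [h]
    · simp [h]

theorem pvLast?_none {q : List Char} {c : Char} (h : pvLast? q c = none) : c ∉ q := by
  induction q with
  | nil => simp
  | cons a t ih =>
    simp only [pvLast?] at h
    rcases hq : pvLast? t c with _ | m
    · rw [hq] at h
      simp only [List.mem_cons, not_or]
      refine ⟨?_, ih hq⟩
      intro hac
      rw [← hac] at h
      simp at h
    · rw [hq] at h; simp at h

theorem pvLast?_lt {q : List Char} {c : Char} {p : Nat} (h : pvLast? q c = some p) : p < q.length := by
  induction q generalizing p with
  | nil => simp [pvLast?] at h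
  | cons a t ih =>
    rcases hq : pvLast? t c with _ | m
    · simp only [pvLast?, hq] at h
      split_ifs at h with hac
      · simp only [Option.some.injEq] at h
        simp [← h]
    · simp only [pvLast?, hq, Option.some.injEq] at h
      have := ih hq
      simp; omega

theorem pvLast?_get {q : List Char} {c : Char} {p : Nat} (h : pvLast? q c = some p) :
    q[p]'(pvLast?_lt h) = c := by
  induction q generalizing p with
  | nil => simp [pvLast?] at h
  | cons a t ih =>
    rcases hq : pvLast? t c with _ | m
    · simp only [pvLast?, hq] at h
      split_ifs at h with hac
      · simp only [Option.some.injEq] at h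
        subst h
        simpa using hac
    · simp only [pvLast?, hq, Option.some.injEq] at h
      subst h
      simpa using ih hq

theorem pvLast?_not_mem_drop {q : List Char} {c : Char} {p : Nat} (h : pvLast? q c = some p) :
    c ∉ q.drop (p + 1) := by
  induction q generalizing p with
  | nil => simp
  | cons a t ih =>
    rcases hq : pvLast? t c with _ | m
    · simp only [pvLast?, hq] at h
      split_ifs at h with hac
      · simp only [Option.some.injEq] at h
        subst h
        simpa using pvLast?_none hq
    · simp only [pvLast?, hq, Option.some.injEq] at h
      subst h
      simpa using ih hq

-- ---- left-pointer invariant : left is minimal with l[left:i] duplicate-free ----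
def pvLeftInv (l : List Char) (i left : Nat) : Prop :=
  left ≤ i ∧ ((l.take i).drop left).Nodup ∧ (left = 0 ∨ ¬ ((l.take i).drop (left - 1)).Nodup)

theorem pv_take_succ_concat (l : List Char) (i : Nat) (hlt : i < l.length) :
    l.take (i + 1) = l.take i ++ [l[i]] := by
  rw [List.take_add_one, List.getElem?_eq_getElem hlt]
  simp

theorem pv_dict_step (l : List Char) (i : Nat) (hlt : i < l.length) (d : PySem.Dict Char Int)
    (hd : ∀ c, d.get? c = (pvLast? (l.take i) c).map (Nat.cast : Nat → Int)) :
    ∀ c', (d.insert l[i] (i : Int)).get? c' = (pvLast? (l.take (i + 1)) c').map (Nat.cast : Nat → Int) := by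
  intro c'
  have hql : (l.take i).length = i := by rw [List.length_take]; omega
  rw [PySem.Dict.get?_insert, pv_take_succ_concat l i hlt, pvLast?_append, hql]
  by_cases h : c' = l[i]
  · simp [h]
  · simp [h, hd c']

theorem pv_leftInv_none (l : List Char) (i left : Nat) (hlt : i < l.length)
    (hL : pvLeftInv l i left) (hnmem : l[i] ∉ (l.take i).drop left) :
    pvLeftInv l (i + 1) left := by
  obtain ⟨hle, hnd, hmin⟩ := hL
  have hql : (l.take i).length = i := by rw [List.length_take]; omega
  refine ⟨by omega, ?_, ?_⟩
  · rw [pv_take_succ_concat l i hlt, List.drop_append_of_le_length (by omega)]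
    exact hnd.append (List.nodup_singleton _) (by simpa using hnmem)
  · rcases hmin with h0 | hnn
    · exact Or.inl h0
    · right
      rw [pv_take_succ_concat l i hlt, List.drop_append_of_le_length (by omega)]
      intro hnod
      exact hnn ((List.sublist_append_left _ _).nodup hnod)

theorem pv_leftInv_some (l : List Char) (i left p : Nat) (hlt : i < l.length)
    (hL : pvLeftInv l i left) (hp : pvLast? (l.take i) l[i] = some p) (hlp : left ≤ p) :
    pvLeftInv l (i + 1) (p + 1) := by
  obtain ⟨hle, hnd, hmin⟩ := hL
  have hql : (l.take i).length = i := by rw [List.length_take]; omega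
  have hplt : p < i := by have := pvLast?_lt hp; omega
  refine ⟨by omega, ?_, Or.inr ?_⟩
  · rw [pv_take_succ_concat l i hlt, List.drop_append_of_le_length (by omega)]
    refine List.Nodup.append ?_ (List.nodup_singleton _) ?_
    · exact ((pv_drop_sublist_drop (l.take i) left (p + 1) (by omega)).nodup) hnd
    · simpa using pvLast?_not_mem_drop hp
  · have h1 : p + 1 - 1 = p := by omega
    rw [h1, pv_take_succ_concat l i hlt, List.drop_append_of_le_length (by omega)]
    intro hnod
    have hcons : (l.take i).drop p = l[i] :: (l.take i).drop (p + 1) := by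
      rw [List.drop_eq_getElem_cons (pvLast?_lt hp), pvLast?_get hp]
    have hmem : l[i] ∈ (l.take i).drop p := by rw [hcons]; exact List.mem_cons_self
    exact (List.disjoint_of_nodup_append hnod) hmem (List.mem_singleton_self _)

theorem pv_window_eq (l : List Char) (i : Nat) (h13 : 13 ≤ i) :
    (l.drop (i + 1 - 14)).take 14 = (l.take (i + 1)).drop (i - 13) := by
  have h1 : i + 1 - 14 = i - 13 := by omega
  have h2 : i + 1 - (i - 13) = 14 := by omega
  rw [List.drop_take, h1, h2]

theorem pv_check_iff (l : List Char) (i nl : Nat) (_hi1 : i + 1 ≤ l.length)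
    (hL : pvLeftInv l (i + 1) nl) :
    ((i : Int) - (nl : Int) ≥ 13) ↔ (14 ≤ i + 1 ∧ ((l.drop (i + 1 - 14)).take 14).Nodup) := by
  obtain ⟨hle, hnd, hmin⟩ := hL
  constructor
  · intro h13
    have h1 : nl + 13 ≤ i := by omega
    refine ⟨by omega, ?_⟩
    rw [pv_window_eq l i (by omega)]
    exact ((pv_drop_sublist_drop (l.take (i + 1)) nl (i - 13) (by omega)).nodup) hnd
  · rintro ⟨h14, hwnd⟩
    by_contra hcon
    have hgt : i - 13 < nl := by omega
    rcases hmin with h0 | hnn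
    · omega
    · exfalso
      apply hnn
      rw [pv_window_eq l i (by omega)] at hwnd
      exact ((pv_drop_sublist_drop (l.take (i + 1)) (i - 13) (nl - 1) (by omega)).nodup) hwnd

theorem pv_phaseB_core (l : List Char) (i nl : Nat) (d' : PySem.Dict Char Int)
    (hlt : i < l.length)
    (hL' : pvLeftInv l (i + 1) nl)
    (ihstep : pvBGo d' (nl : Int) ((i + 1 : Nat) : Int) (l.drop (i + 1)) = pvFindB l (i + 2)) :
    (if (i : Int) - (nl : Int) ≥ 13 then (i : Int) + 1
     else pvBGo d' (nl : Int) ((i : Int) + 1) (l.drop (i + 1))) = pvFindB l (i + 1) := by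
  have hc : (i : Int) + 1 = ((i + 1 : Nat) : Int) := by push_cast; ring
  by_cases hcnd : (i : Int) - (nl : Int) ≥ 13
  · rw [if_pos hcnd]
    obtain ⟨h14, hwnd⟩ := (pv_check_iff l i nl (by omega) hL').mp hcnd
    rw [pvFindB, dif_pos (by omega), if_pos ⟨h14, hwnd⟩]
    exact hc
  · rw [if_neg hcnd, hc, ihstep]
    have htest : ¬ (14 ≤ i + 1 ∧ ((l.drop (i + 1 - 14)).take 14).Nodup) := by
      intro ht
      exact hcnd ((pv_check_iff l i nl (by omega) hL').mpr ht)
    have heq : pvFindB l (i + 1) = pvFindB l (i + 2) := by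
      rw [pvFindB, dif_pos (by omega), if_neg htest]
    exact heq.symm

theorem pv_phaseB (l : List Char) : ∀ k i (d : PySem.Dict Char Int) (left : Nat),
    l.length - i = k → i ≤ l.length →
    (∀ c, d.get? c = (pvLast? (l.take i) c).map (Nat.cast : Nat → Int)) →
    pvLeftInv l i left →
    pvBGo d (left : Int) (i : Int) (l.drop i) = pvFindB l (i + 1) := by
  intro k
  induction k with
  | zero =>
    intro i d left hk hi hd hL
    have hie : i = l.length := by omega
    rw [hie, List.drop_length, pvFindB_gt l (l.length + 1) (by omega)]
    rfl
  | succ k ih =>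
    intro i d left hk hi hd hL
    have hlt : i < l.length := by omega
    have hd' := pv_dict_step l i hlt d hd
    rw [List.drop_eq_getElem_cons hlt, pvBGo]
    simp only [hd (l[i])]
    rcases hp : pvLast? (l.take i) l[i] with _ | p
    · simp only [Option.map_none]
      have hL' : pvLeftInv l (i + 1) left := by
        refine pv_leftInv_none l i left hlt hL ?_
        intro hmem
        exact pvLast?_none hp (List.mem_of_mem_drop hmem)
      exact pv_phaseB_core l i left _ hlt hL'
        (ih (i + 1) _ left (by omega) (by omega) hd' hL')
    · simp only [Option.map_some]
      by_cases hlp : left ≤ p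
      · rw [if_pos (show (left : Int) ≤ (p : Int) by exact_mod_cast hlp)]
        have hL' := pv_leftInv_some l i left p hlt hL hp hlp
        have hcast : (p : Int) + 1 = ((p + 1 : Nat) : Int) := by omega
        rw [hcast]
        exact pv_phaseB_core l i (p + 1) _ hlt hL'
          (ih (i + 1) _ (p + 1) (by omega) (by omega) hd' hL')
      · rw [if_neg (show ¬ (left : Int) ≤ (p : Int) by exact_mod_cast hlp)]
        have hL' : pvLeftInv l (i + 1) left := by
          refine pv_leftInv_none l i left hlt hL ?_
          intro hmem
          have hsub : ((l.take i).drop left).Sublist ((l.take i).drop (p + 1)) :=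
            pv_drop_sublist_drop (l.take i) (p + 1) left (by omega)
          exact pvLast?_not_mem_drop hp (hsub.subset hmem)
        exact pv_phaseB_core l i left _ hlt hL'
          (ih (i + 1) _ left (by omega) (by omega) hd' hL')

theorem pv_findB_low (l : List Char) : ∀ k i, 14 - i = k → i ≤ 14 → pvFindB l i = pvFindB l 14 := by
  intro k
  induction k with
  | zero => intro i hk hi; have : i = 14 := by omega
            rw [this]
  | succ k ih =>
    intro i hk hi
    have hi14 : i < 14 := by omega
    by_cases hl : i ≤ l.length
    · rw [pvFindB]
      rw [dif_pos hl, if_neg (by omega)]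
      exact ih (i + 1) (by omega) (by omega)
    · rw [pvFindB_gt l i (by omega), pvFindB_gt l 14 (by omega)]

theorem pv_B_eq (f : String) : sub_Routine_alt f = pvFindB f.toList 14 := by
  have h := pv_phaseB f.toList (f.toList.length) 0 PySem.Dict.empty 0 rfl (by omega)
    (by intro c; simp [pvLast?, PySem.Dict.get?_empty])
    (by refine ⟨le_refl 0, by simp, Or.inl rfl⟩)
  rw [sub_Routine_alt]
  simp only [Nat.cast_zero, List.drop_zero] at h
  rw [h]
  exact pv_findB_low f.toList 13 1 rfl (by omega)

-- ---- D_ in window form ----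
theorem pv_win_eq (l : List Char) (e : Nat) (h14 : 14 ≤ e) :
    (l.take e).drop (e - 14) = (l.drop (e - 14)).take 14 := by
  rw [List.drop_take]; congr 1; omega

theorem pv_D_iff (f : String) :
    D_sub_Routine f ↔
      (14 ≤ f.toList.length ∧
       (∀ e < f.toList.length, 14 ≤ e → ¬ ((f.toList.drop (e - 14)).take 14).Nodup) ∧
       ((f.toList.drop (f.toList.length - 14)).take 14).Nodup) := by
  unfold D_sub_Routine
  constructor
  · rintro ⟨hgood, h14, hbad⟩
    refine ⟨h14, ?_, hgood⟩
    intro e hel h14e hw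
    exact hbad e hel h14e (by rw [pv_win_eq _ _ h14e]; exact hw)
  · rintro ⟨h14, hbad, hgood⟩
    refine ⟨hgood, h14, ?_⟩
    intro e hel h14e hnd
    exact hbad e hel h14e (by rw [← pv_win_eq _ _ h14e]; exact hnd)

-- ---- relating the two searches via D_ ----
theorem pv_find_none (l : List Char) : ∀ k i, l.length - i = k →
    (∀ e < l.length, i ≤ e → 14 ≤ e → ¬ ((l.drop (e - 14)).take 14).Nodup) →
    pvFind l i = (l.length : Int) - 1 := by
  intro k
  induction k with
  | zero => intro i hk _; exact pvFind_ge l i (by omega)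
  | succ k ih =>
    intro i hk hbad
    have hlt : i < l.length := by omega
    rw [pvFind, dif_pos hlt, if_neg (fun hc => hbad i hlt (le_refl i) hc.1 hc.2)]
    exact ih (i + 1) (by omega) (fun e he hie h14 => hbad e he (by omega) h14)

theorem pv_findB_last (l : List Char) (_h14 : 14 ≤ l.length)
    (hbad : ∀ e < l.length, 14 ≤ e → ¬ ((l.drop (e - 14)).take 14).Nodup)
    (hgood : ((l.drop (l.length - 14)).take 14).Nodup) :
    ∀ k i, l.length - i = k → 14 ≤ i → i ≤ l.length → pvFindB l i = (l.length : Int) := by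
  intro k
  induction k with
  | zero =>
    intro i hk h14i hi
    have hie : i = l.length := by omega
    subst hie
    rw [pvFindB, dif_pos (le_refl _), if_pos ⟨h14i, hgood⟩]
  | succ k ih =>
    intro i hk h14i hi
    have hlt : i < l.length := by omega
    rw [pvFindB, dif_pos (by omega), if_neg (fun hc => hbad i hlt h14i hc.2)]
    exact ih (i + 1) (by omega) (by omega) (by omega)

theorem pv_findB_none (l : List Char)
    (hbad : ∀ e, 14 ≤ e → e ≤ l.length → ¬ ((l.drop (e - 14)).take 14).Nodup) :
    ∀ k i, l.length + 1 - i = k → pvFindB l i = (l.length : Int) - 1 := by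
  intro k
  induction k with
  | zero => intro i hk; exact pvFindB_gt l i (by omega)
  | succ k ih =>
    intro i hk
    by_cases hle : i ≤ l.length
    · rw [pvFindB, dif_pos hle, if_neg (fun hc => hbad i hc.1 hle hc.2)]
      exact ih (i + 1) (by omega)
    · exact pvFindB_gt l i (by omega)

theorem pv_find_eq_findB_of_hit (l : List Char) :
    ∀ k i, l.length - i = k →
    (∃ e, i ≤ e ∧ e < l.length ∧ 14 ≤ e ∧ ((l.drop (e - 14)).take 14).Nodup) →
    pvFind l i = pvFindB l i := by
  intro k
  induction k with
  | zero =>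
    intro i hk ⟨e, hie, hel, _, _⟩
    omega
  | succ k ih =>
    intro i hk hex
    obtain ⟨e, hie, hel, h14, hnd⟩ := hex
    have hlt : i < l.length := by omega
    rw [pvFind, dif_pos hlt, pvFindB, dif_pos (by omega)]
    by_cases ht : 14 ≤ i ∧ ((l.drop (i - 14)).take 14).Nodup
    · rw [if_pos ht, if_pos ht]
    · rw [if_neg ht, if_neg ht]
      have hne : i ≠ e := fun hc => ht (hc ▸ ⟨h14, hnd⟩)
      exact ih (i + 1) (by omega) ⟨e, by omega, hel, h14, hnd⟩

theorem pv_unchanged (f : String) (hD : ¬ D_sub_Routine f) :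
    pvFind f.toList 14 = pvFindB f.toList 14 := by
  set l := f.toList with hl
  by_cases h14 : 14 ≤ l.length
  · by_cases hhit : ∃ e, 14 ≤ e ∧ e < l.length ∧ ((l.drop (e - 14)).take 14).Nodup
    · obtain ⟨e, h14e, hel, hnd⟩ := hhit
      exact pv_find_eq_findB_of_hit l (l.length - 14) 14 rfl ⟨e, h14e, hel, h14e, hnd⟩
    · have hbad : ∀ e < l.length, 14 ≤ e → ¬ ((l.drop (e - 14)).take 14).Nodup :=
        fun e hel h14e hnd => hhit ⟨e, h14e, hel, hnd⟩
      have hlastbad : ¬ ((l.drop (l.length - 14)).take 14).Nodup := by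
        intro hg
        exact hD ((pv_D_iff f).mpr ⟨h14, hbad, hg⟩)
      have hbadB : ∀ e, 14 ≤ e → e ≤ l.length → ¬ ((l.drop (e - 14)).take 14).Nodup := by
        intro e h14e hel
        by_cases he : e = l.length
        · subst he; exact hlastbad
        · exact hbad e (by omega) h14e
      rw [pv_find_none l (l.length - 14) 14 rfl (fun e hel _ h14e => hbad e hel h14e),
        pv_findB_none l hbadB (l.length + 1 - 14) 14 rfl]
  · rw [pvFind_ge l 14 (by omega), pvFindB_gt l 14 (by omega)]

-- ===== VERDICT (by name: the statement is the Claim_ definition above) =====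
theorem sub_Routine_spec : Claim_unchanged_sub_Routine := by
  intro f _ _
  unfold Spec_sub_Routine
  intro hD
  rw [pv_A_eq, pv_B_eq]
  exact pv_unchanged f hD

theorem sub_Routine_changed : Claim_changed_sub_Routine := by
  unfold Claim_changed_sub_Routine; decide

theorem sub_Routine_tight : Claim_exact_sub_Routine := by
  intro f _ _ hD
  obtain ⟨h14, hbad, hgood⟩ := (pv_D_iff f).mp hD
  rw [pv_A_eq, pv_B_eq,
    pv_find_none f.toList (f.toList.length - 14) 14 rfl (fun e hel _ h14e => hbad e hel h14e),
    pv_findB_last f.toList h14 hbad hgood (f.toList.length - 14) 14 rfl (le_refl _) h14]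
  omega
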